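-- pv_equiv track=rewrite | github.com/Omkar02/FAANG | AZ_LC_844_Backspace_String_Compare.py | _Backhelper
-- ===== SOURCE A (Python) =====
-- def _Backhelper(strX):
--     remaning = []
--     skip = 0
--     for i in reversed(strX):
--         if i == '#':
--             skip += 1
--         elif skip:
--             skip -= 1
--         else:
--             remaning.append(i)
--     return remaning
-- ===== SOURCE B (Python) =====
-- def _Backhelper(strX):
--     stack = []
--     for i in strX:
--         if i == '#':
--             if stack:
--                 stack.pop()
--         else:
--             stack.append(i)
--     return list(reversed(stack))
-- ===== Notes on version B (the rewrite author's own statement) =====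
-- stated objective: idiomatic
-- what changed: Replaces A's reverse-pass with a skip counter by the standard forward stack (push char, pop on '#') followed by one reversal.
import Mathlib
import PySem

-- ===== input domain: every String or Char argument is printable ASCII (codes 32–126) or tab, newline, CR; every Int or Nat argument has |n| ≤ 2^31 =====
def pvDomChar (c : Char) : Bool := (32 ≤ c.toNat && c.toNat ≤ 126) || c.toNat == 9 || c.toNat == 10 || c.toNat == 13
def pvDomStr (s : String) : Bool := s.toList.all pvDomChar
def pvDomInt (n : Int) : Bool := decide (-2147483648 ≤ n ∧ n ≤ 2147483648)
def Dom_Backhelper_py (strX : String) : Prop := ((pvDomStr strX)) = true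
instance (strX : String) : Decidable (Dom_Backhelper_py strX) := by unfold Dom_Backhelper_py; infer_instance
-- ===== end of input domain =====

-- B replaces A's reverse-pass skip-counter by the idiomatic forward stack (push char, pop on '#') plus one final reversal; return value only, no speed claim.

-- ===== PORT A =====
-- reverse traversal, skip counter, append surviving char (as a 1-char string)
def Backhelper_py (strX : String) : List String :=
  (strX.toList.reverse.foldl
    (fun (st : List String × Nat) (i : Char) =>
      if i = '#' then (st.1, st.2 + 1)
      else if st.2 ≠ 0 then (st.1, st.2 - 1)
      else (st.1 ++ [i.toString], st.2)) ([], 0)).1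

-- ===== PORT B =====
-- forward stack: pop on '#' when non-empty (dropLast [] = []), else push; then list(reversed(stack))
def Backhelper_py_alt (strX : String) : List String :=
  (strX.toList.foldl
    (fun (stack : List String) (i : Char) =>
      if i = '#' then stack.dropLast else stack ++ [i.toString]) []).reverse

-- ===== PRECONDITION & SPEC =====
def Spec_Backhelper_py (strX : String) (out : List String) : Prop := out = Backhelper_py_alt strX
instance (strX : String) (out : List String) : Decidable (Spec_Backhelper_py strX out) := by unfold Spec_Backhelper_py; infer_instance

-- ===== CLAIM (what is proved, stated in full; the proofs are below) =====
def Claim_equal_Backhelper_py : Prop := ∀ (strX : String), Dom_Backhelper_py strX → Spec_Backhelper_py strX (Backhelper_py strX)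

-- ===== LEMMAS AND PROOFS =====

-- canonical reversed-stack form: head = top of stack
def pvCore (l : List Char) : List String :=
  l.foldl (fun t c => if c = '#' then t.tail else c.toString :: t) []

-- A's loop characterised by a pure recursion
def pvAuxA : List Char → Nat → List String
  | [], _ => []
  | c :: r, k =>
    if c = '#' then pvAuxA r (k + 1)
    else if k ≠ 0 then pvAuxA r (k - 1)
    else c.toString :: pvAuxA r k

theorem pvA_foldl (r : List Char) : ∀ (acc : List String) (k : Nat),
    (r.foldl (fun (st : List String × Nat) (i : Char) =>
      if i = '#' then (st.1, st.2 + 1)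
      else if st.2 ≠ 0 then (st.1, st.2 - 1)
      else (st.1 ++ [i.toString], st.2)) (acc, k)).1 = acc ++ pvAuxA r k := by
  induction r with
  | nil => intro acc k; simp [pvAuxA]
  | cons c r ih =>
    intro acc k
    simp only [List.foldl_cons]
    by_cases hc : c = '#'
    · rw [if_pos hc, ih]; simp [pvAuxA, hc]
    · rw [if_neg hc]
      by_cases hk : k ≠ 0
      · rw [if_pos hk, ih]; simp [pvAuxA, hc, hk]
      · rw [if_neg hk, ih]
        simp only [ne_eq, Decidable.not_not] at hk
        simp [pvAuxA, hc, hk]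

theorem pvRevDropLast {α : Type} (s : List α) : s.dropLast.reverse = s.reverse.tail := by
  induction s using List.reverseRecOn with
  | nil => rfl
  | append_singleton s a ih => simp

theorem pvAuxA_core (r : List Char) : ∀ (k : Nat), pvAuxA r k = (pvCore r.reverse).drop k := by
  induction r with
  | nil => intro k; simp [pvAuxA, pvCore]
  | cons c r ih =>
    intro k
    have hcore : pvCore (c :: r).reverse
        = (if c = '#' then (pvCore r.reverse).tail else c.toString :: pvCore r.reverse) := by
      simp [pvCore, List.reverse_cons, List.foldl_append]
    by_cases hc : c = '#'
    · rw [pvAuxA, if_pos hc, ih, hcore, if_pos hc, List.drop_tail]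
    · by_cases hk : k ≠ 0
      · rw [pvAuxA, if_neg hc, if_pos hk, ih, hcore, if_neg hc]
        obtain ⟨k', rfl⟩ : ∃ k', k = k' + 1 := ⟨k - 1, by omega⟩
        simp
      · simp only [ne_eq, Decidable.not_not] at hk
        subst hk
        rw [pvAuxA, if_neg hc, if_neg (by simp), ih, hcore, if_neg hc]
        simp

theorem pvB_foldl (l : List Char) : ∀ (s : List String),
    (l.foldl (fun (stack : List String) (i : Char) =>
      if i = '#' then stack.dropLast else stack ++ [i.toString]) s).reverse
    = l.foldl (fun t c => if c = '#' then t.tail else c.toString :: t) s.reverse := by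
  induction l with
  | nil => intro s; simp
  | cons c l ih =>
    intro s
    simp only [List.foldl_cons]
    by_cases hc : c = '#'
    · rw [if_pos hc, if_pos hc, ih, pvRevDropLast]
    · rw [if_neg hc, if_neg hc, ih]
      simp

-- ===== VERDICT (by name: the statement is the Claim_ definition above) =====
theorem Backhelper_py_spec : Claim_equal_Backhelper_py := by
  intro strX _
  unfold Spec_Backhelper_py Backhelper_py Backhelper_py_alt
  rw [pvA_foldl, pvAuxA_core, pvB_foldl]
  simp [pvCore]
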